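-- pv_equiv track=rewrite | github.com/cta-wave/WMAS | tools/wave/testing/tests_manager.py | _get_next_test_from_list
-- ===== SOURCE A (Python) =====
-- def _get_next_test_from_list(tests):
--     test = None
--     api = None
--     has_http = True
--     has_manual = True
--     current_api = 0
--     current_test = 0
--
--     apis = list(tests.keys())
--     apis.sort(key=lambda api: api.lower())
--
--     for api in apis:
--         tests[api].sort(key=lambda api: api.replace(u"/", u"").lower())
--
--     while test is None:
--         if len(apis) <= current_api:
--             return None
--         api = apis[current_api]
--
--         if len(tests[api]) <= current_test:
--             current_api = current_api + 1
--             current_test = 0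
--
--             if current_api == len(apis):
--                 if has_http:
--                     has_http = False
--                     current_api = 0
--                     test = None
--                     continue
--
--                 if has_manual:
--                     has_manual = False
--                     current_api = 0
--                     test = None
--                     has_http = True
--                     continue
--
--                 return None
--
--             test = None
--             continue
--         test = tests[api][current_test]
--
--         if u"manual" in test and u"https" not in test:
--             return test
--
--         if u"manual" in test and u"https" in test:
--             if not has_http:
--                 return test
--
--         if u"manual" not in test and u"https" not in test:
--             if not has_manual:
--                 return test
--
--         if u"manual" not in test and u"https" in test:
--             if not has_manual and not has_http:
--                 return test
--
--         current_test = current_test + 1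
--         test = None
--
--     return test
-- ===== SOURCE B (Python) =====
-- def _get_next_test_from_list(tests):
--     apis = sorted(tests.keys(), key=lambda a: a.lower())
--     for api in apis:
--         tests[api].sort(key=lambda t: t.replace(u"/", u"").lower())
--     flat = [t for api in apis for t in tests[api]]
--     for pred in (
--         lambda t: u"manual" in t and u"https" not in t,
--         lambda t: u"manual" in t and u"https" in t,
--         lambda t: u"manual" not in t and u"https" not in t,
--         lambda t: u"manual" not in t and u"https" in t,
--     ):
--         for t in flat:
--             if pred(t):
--                 return t
--     return None
-- ===== Notes on version B (the rewrite author's own statement) =====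
-- stated objective: simpler
-- what changed: Replaces A's four-flag (has_http/has_manual) resumable index state machine over the dict with one precomputed flat sorted test list scanned once per explicit priority category (manual&no-https, manual&https, neither, https-only).
import Mathlib
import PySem

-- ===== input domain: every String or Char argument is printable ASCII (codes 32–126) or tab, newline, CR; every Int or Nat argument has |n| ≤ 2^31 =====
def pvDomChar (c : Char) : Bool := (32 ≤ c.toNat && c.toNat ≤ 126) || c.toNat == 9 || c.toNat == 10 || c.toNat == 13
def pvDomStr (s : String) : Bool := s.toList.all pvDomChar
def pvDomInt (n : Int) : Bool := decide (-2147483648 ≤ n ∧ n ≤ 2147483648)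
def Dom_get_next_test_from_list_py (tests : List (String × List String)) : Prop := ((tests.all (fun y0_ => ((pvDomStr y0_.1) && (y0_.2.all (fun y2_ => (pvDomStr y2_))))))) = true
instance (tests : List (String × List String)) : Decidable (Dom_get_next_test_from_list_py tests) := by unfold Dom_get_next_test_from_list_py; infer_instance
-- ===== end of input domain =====

-- B replaces A's four-flag state machine with one flat sorted list scanned once per priority category (objective: simpler).
-- Both A and B sort each tests[api] list in place (same observable mutation); the equivalence proved is about the return value.


-- termination helpers for the port's while-loop (cited by name in decreasing_by)
def pvRank (hh hm : Bool) : Nat := match hh, hm with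
  | true, true => 3 | false, true => 2 | true, false => 1 | false, false => 0

theorem pvLexFst {x1 y1 z1 x2 y2 z2 : Nat} (h : x1 < x2) :
    Prod.Lex (fun a b : Nat => a < b) (Prod.Lex (fun a b : Nat => a < b) (fun a b : Nat => a < b))
      (x1, y1, z1) (x2, y2, z2) := Prod.Lex.left _ _ h

theorem pvLexSnd {x y1 z1 y2 z2 : Nat} (h : y1 < y2) :
    Prod.Lex (fun a b : Nat => a < b) (Prod.Lex (fun a b : Nat => a < b) (fun a b : Nat => a < b))
      (x, y1, z1) (x, y2, z2) := Prod.Lex.right _ (Prod.Lex.left _ _ h)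

theorem pvLexThd {x y z1 z2 : Nat} (h : z1 < z2) :
    Prod.Lex (fun a b : Nat => a < b) (Prod.Lex (fun a b : Nat => a < b) (fun a b : Nat => a < b))
      (x, y, z1) (x, y, z2) := Prod.Lex.right _ (Prod.Lex.right _ h)

theorem pvRank_lt1 (hm : Bool) : pvRank false hm < pvRank true hm := by cases hm <;> decide
theorem pvRank_lt2 (hh : Bool) (h : hh = false) : pvRank true false < pvRank hh true := by
  subst h; decide

-- ===== PORT A =====
-- the while loop of A: state (current_api, current_test, has_http, has_manual)
def pvAloop (apis : List String) (d : PySem.Dict String (List String))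
    (i j : Nat) (hh hm : Bool) : Option String :=
  if h1 : apis.length ≤ i then none
  else
    -- api = apis[current_api]; tests[api] is read as d.getD (apis.getD i "") []
    if h2 : (d.getD (apis.getD i "") []).length ≤ j then
      if hlast : i + 1 = apis.length then
        if hh then pvAloop apis d 0 0 false hm
        else if hm then pvAloop apis d 0 0 true false
        else none
      else pvAloop apis d (i + 1) 0 hh hm
    else
      let test := (d.getD (apis.getD i "") []).getD j ""
      if PySem.Str.isIn "manual" test && !(PySem.Str.isIn "https" test) then some test
      else if PySem.Str.isIn "manual" test && PySem.Str.isIn "https" test then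
        (if !hh then some test else pvAloop apis d i (j + 1) hh hm)
      else if !(PySem.Str.isIn "manual" test) && !(PySem.Str.isIn "https" test) then
        (if !hm then some test else pvAloop apis d i (j + 1) hh hm)
      else
        (if !hm && !hh then some test else pvAloop apis d i (j + 1) hh hm)
termination_by (pvRank hh hm, apis.length - i, (d.getD (apis.getD i "") []).length + 1 - j)
decreasing_by
  · rename_i hhh; exact hhh ▸ pvLexFst (pvRank_lt1 hm)
  · rename_i hhh hhm; rw [hhm]; exact pvLexFst (pvRank_lt2 hh (by simpa using hhh))
  · exact pvLexSnd (by omega)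
  · exact pvLexThd (by omega)
  · exact pvLexThd (by omega)
  · exact pvLexThd (by omega)

def get_next_test_from_list_py (tests : List (String × List String)) : Option String :=
  let d := PySem.Dict.ofList tests
  let apis := PySem.List.sorted d.keys (fun a => PySem.Str.lower a) false
  let d := apis.foldl
    (fun d api =>
      d.insert api
        (PySem.List.sorted (d.getD api [])
          (fun t => PySem.Str.lower (PySem.Str.replace t "/" "")) false)) d
  pvAloop apis d 0 0 true true

-- ===== PORT B =====
def get_next_test_from_list_py_alt (tests : List (String × List String)) : Option String :=
  let d := PySem.Dict.ofList tests
  let apis := PySem.List.sorted d.keys (fun a => PySem.Str.lower a) false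
  let d := apis.foldl
    (fun d api =>
      d.insert api
        (PySem.List.sorted (d.getD api [])
          (fun t => PySem.Str.lower (PySem.Str.replace t "/" "")) false)) d
  let flat := apis.flatMap (fun api => d.getD api [])
  match flat.find? (fun t => PySem.Str.isIn "manual" t && !(PySem.Str.isIn "https" t)) with
  | some t => some t
  | none =>
  match flat.find? (fun t => PySem.Str.isIn "manual" t && PySem.Str.isIn "https" t) with
  | some t => some t
  | none =>
  match flat.find? (fun t => !(PySem.Str.isIn "manual" t) && !(PySem.Str.isIn "https" t)) with
  | some t => some t
  | none =>
  match flat.find? (fun t => !(PySem.Str.isIn "manual" t) && PySem.Str.isIn "https" t) with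
  | some t => some t
  | none => none

-- ===== PRECONDITION & SPEC =====
def Spec_get_next_test_from_list_py (tests : List (String × List String)) (out : Option String) : Prop := out = get_next_test_from_list_py_alt tests
instance (tests : List (String × List String)) (out : Option String) : Decidable (Spec_get_next_test_from_list_py tests out) := by unfold Spec_get_next_test_from_list_py; infer_instance

-- ===== CLAIM (what is proved, stated in full; the proofs are below) =====
def Claim_equal_get_next_test_from_list_py : Prop := ∀ (tests : List (String × List String)), Dom_get_next_test_from_list_py tests → Spec_get_next_test_from_list_py tests (get_next_test_from_list_py tests)

-- ===== LEMMAS AND PROOFS =====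

-- the element returned by phase (hh, hm) of A's state machine
def pvPred (hh hm : Bool) (t : String) : Bool :=
  (PySem.Str.isIn "manual" t && !(PySem.Str.isIn "https" t)) ||
  (PySem.Str.isIn "manual" t && PySem.Str.isIn "https" t && !hh) ||
  (!(PySem.Str.isIn "manual" t) && !(PySem.Str.isIn "https" t) && !hm) ||
  (!(PySem.Str.isIn "manual" t) && PySem.Str.isIn "https" t && !hm && !hh)

-- the tests still to be scanned from state (i, j), in scan order
def pvFlatFrom (apis : List String) (d : PySem.Dict String (List String)) (i j : Nat) : List String :=
  (d.getD (apis.getD i "") []).drop j ++ (apis.drop (i + 1)).flatMap (fun api => d.getD api [])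

-- what A's loop does after exhausting the list in phase (hh, hm)
def pvNextPhase (apis : List String) (d : PySem.Dict String (List String)) (hh hm : Bool) : Option String :=
  if hh then pvAloop apis d 0 0 false hm
  else if hm then pvAloop apis d 0 0 true false
  else none

-- unfolding of pvAloop at an in-range test position
theorem pvAloop_step (apis : List String) (d : PySem.Dict String (List String)) (i j : Nat)
    (hh hm : Bool) (h1 : i < apis.length) (h2 : j < (d.getD (apis.getD i "") []).length) :
  pvAloop apis d i j hh hm =
    (if PySem.Str.isIn "manual" ((d.getD (apis.getD i "") []).getD j "") &&
        !(PySem.Str.isIn "https" ((d.getD (apis.getD i "") []).getD j "")) then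
      some ((d.getD (apis.getD i "") []).getD j "")
     else if PySem.Str.isIn "manual" ((d.getD (apis.getD i "") []).getD j "") &&
        PySem.Str.isIn "https" ((d.getD (apis.getD i "") []).getD j "") then
       (if !hh then some ((d.getD (apis.getD i "") []).getD j "") else pvAloop apis d i (j + 1) hh hm)
     else if !(PySem.Str.isIn "manual" ((d.getD (apis.getD i "") []).getD j "")) &&
        !(PySem.Str.isIn "https" ((d.getD (apis.getD i "") []).getD j "")) then
       (if !hm then some ((d.getD (apis.getD i "") []).getD j "") else pvAloop apis d i (j + 1) hh hm)
     else
       (if !hm && !hh then some ((d.getD (apis.getD i "") []).getD j "") else pvAloop apis d i (j + 1) hh hm)) := by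
  rw [pvAloop]
  rw [dif_neg (Nat.not_le.mpr h1)]
  rw [dif_neg (Nat.not_le.mpr h2)]

theorem pvAloop_eq_find (apis : List String) (d : PySem.Dict String (List String)) :
    ∀ (i j : Nat) (hh hm : Bool), i < apis.length →
    pvAloop apis d i j hh hm =
      match (pvFlatFrom apis d i j).find? (pvPred hh hm) with
      | some t => some t
      | none => pvNextPhase apis d hh hm := by
  intro i j hh hm
  induction i, j, hh, hm using pvAloop.induct (apis := apis) (d := d) with
  | case1 i j hh hm h1 => intro hi; omega
  | case2 i j hm h1 h2 hlast ih =>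
      intro hi
      simp only [List.getD] at h2
      have hff : pvFlatFrom apis d i j = [] := by
        simp [pvFlatFrom, List.getD, List.drop_eq_nil_of_le h2,
          List.drop_eq_nil_of_le (by omega : apis.length ≤ i + 1)]
      rw [pvAloop, hff]
      simp [pvNextPhase, h1, h2, hlast]
  | case3 i j hh h1 h2 hlast hhh ih =>
      intro hi
      simp only [List.getD] at h2
      have hff : pvFlatFrom apis d i j = [] := by
        simp [pvFlatFrom, List.getD, List.drop_eq_nil_of_le h2,
          List.drop_eq_nil_of_le (by omega : apis.length ≤ i + 1)]
      have hhf : hh = false := by simpa using hhh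
      rw [pvAloop, hff]
      simp [pvNextPhase, h1, h2, hlast, hhf]
  | case4 i j hh hm h1 h2 hlast hhh hhm =>
      intro hi
      simp only [List.getD] at h2
      have hff : pvFlatFrom apis d i j = [] := by
        simp [pvFlatFrom, List.getD, List.drop_eq_nil_of_le h2,
          List.drop_eq_nil_of_le (by omega : apis.length ≤ i + 1)]
      have hhf : hh = false := by simpa using hhh
      have hmf : hm = false := by simpa using hhm
      rw [pvAloop, hff]
      simp [pvNextPhase, h1, h2, hlast, hhf, hmf]
  | case5 i j hh hm h1 h2 hlast ih =>
      intro hi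
      simp only [List.getD] at h2
      have hi1 : i + 1 < apis.length := by omega
      have hff : pvFlatFrom apis d i j = pvFlatFrom apis d (i + 1) 0 := by
        simp only [pvFlatFrom, List.getD, List.drop_eq_nil_of_le h2, List.nil_append,
          List.drop_zero]
        rw [List.drop_eq_getElem_cons hi1, List.flatMap_cons]
        simp only [List.getElem?_eq_getElem hi1, Option.getD_some]
      rw [pvAloop, hff, ih hi1]
      simp [h1, h2, hlast]
  | case6 i j hh hm h1 h2 tst hp1 =>
      intro hi
      have hj : j < (d.getD (apis.getD i "") []).length := by omega
      have hcons : pvFlatFrom apis d i j =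
          (d.getD (apis.getD i "") []).getD j "" :: pvFlatFrom apis d i (j + 1) := by
        simp only [pvFlatFrom]
        rw [List.drop_eq_getElem_cons hj, List.cons_append]
        rw [List.getD_eq_getElem _ _ hj]
      have htst0 : tst = (d.getD (apis.getD i "") []).getD j "" := rfl
      rw [htst0] at hp1
      rw [pvAloop_step apis d i j hh hm hi hj, hcons, List.find?_cons]
      cases hm1 : PySem.Str.isIn "manual" ((d.getD (apis.getD i "") []).getD j "") <;>
        cases hh1 : PySem.Str.isIn "https" ((d.getD (apis.getD i "") []).getD j "") <;>
        simp_all [pvPred]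
  | case7 i j hh hm h1 h2 tst hp1 hp2 hhh =>
      intro hi
      have hj : j < (d.getD (apis.getD i "") []).length := by omega
      have hcons : pvFlatFrom apis d i j =
          (d.getD (apis.getD i "") []).getD j "" :: pvFlatFrom apis d i (j + 1) := by
        simp only [pvFlatFrom]
        rw [List.drop_eq_getElem_cons hj, List.cons_append]
        rw [List.getD_eq_getElem _ _ hj]
      have htst0 : tst = (d.getD (apis.getD i "") []).getD j "" := rfl
      rw [htst0] at hp1 hp2
      rw [pvAloop_step apis d i j hh hm hi hj, hcons, List.find?_cons]
      cases hm1 : PySem.Str.isIn "manual" ((d.getD (apis.getD i "") []).getD j "") <;>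
        cases hh1 : PySem.Str.isIn "https" ((d.getD (apis.getD i "") []).getD j "") <;>
        simp_all [pvPred]
  | case8 i j hh hm h1 h2 tst hp1 hp2 hhh ih =>
      intro hi
      have hj : j < (d.getD (apis.getD i "") []).length := by omega
      have hcons : pvFlatFrom apis d i j =
          (d.getD (apis.getD i "") []).getD j "" :: pvFlatFrom apis d i (j + 1) := by
        simp only [pvFlatFrom]
        rw [List.drop_eq_getElem_cons hj, List.cons_append]
        rw [List.getD_eq_getElem _ _ hj]
      have htst0 : tst = (d.getD (apis.getD i "") []).getD j "" := rfl
      rw [htst0] at hp1 hp2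
      have hih := ih hi
      rw [pvAloop_step apis d i j hh hm hi hj, hcons, List.find?_cons]
      cases hm1 : PySem.Str.isIn "manual" ((d.getD (apis.getD i "") []).getD j "") <;>
        cases hh1 : PySem.Str.isIn "https" ((d.getD (apis.getD i "") []).getD j "") <;>
        simp_all [pvPred]
  | case9 i j hh hm h1 h2 tst hp1 hp2 hp3 hhm =>
      intro hi
      have hj : j < (d.getD (apis.getD i "") []).length := by omega
      have hcons : pvFlatFrom apis d i j =
          (d.getD (apis.getD i "") []).getD j "" :: pvFlatFrom apis d i (j + 1) := by
        simp only [pvFlatFrom]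
        rw [List.drop_eq_getElem_cons hj, List.cons_append]
        rw [List.getD_eq_getElem _ _ hj]
      have htst0 : tst = (d.getD (apis.getD i "") []).getD j "" := rfl
      rw [htst0] at hp1 hp2 hp3
      rw [pvAloop_step apis d i j hh hm hi hj, hcons, List.find?_cons]
      cases hm1 : PySem.Str.isIn "manual" ((d.getD (apis.getD i "") []).getD j "") <;>
        cases hh1 : PySem.Str.isIn "https" ((d.getD (apis.getD i "") []).getD j "") <;>
        simp_all [pvPred]
  | case10 i j hh hm h1 h2 tst hp1 hp2 hp3 hhm ih =>
      intro hi
      have hj : j < (d.getD (apis.getD i "") []).length := by omega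
      have hcons : pvFlatFrom apis d i j =
          (d.getD (apis.getD i "") []).getD j "" :: pvFlatFrom apis d i (j + 1) := by
        simp only [pvFlatFrom]
        rw [List.drop_eq_getElem_cons hj, List.cons_append]
        rw [List.getD_eq_getElem _ _ hj]
      have htst0 : tst = (d.getD (apis.getD i "") []).getD j "" := rfl
      rw [htst0] at hp1 hp2 hp3
      have hih := ih hi
      rw [pvAloop_step apis d i j hh hm hi hj, hcons, List.find?_cons]
      cases hm1 : PySem.Str.isIn "manual" ((d.getD (apis.getD i "") []).getD j "") <;>
        cases hh1 : PySem.Str.isIn "https" ((d.getD (apis.getD i "") []).getD j "") <;>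
        simp_all [pvPred]
  | case11 i j hh hm h1 h2 tst hp1 hp2 hp3 hhmhh =>
      intro hi
      have hj : j < (d.getD (apis.getD i "") []).length := by omega
      have hcons : pvFlatFrom apis d i j =
          (d.getD (apis.getD i "") []).getD j "" :: pvFlatFrom apis d i (j + 1) := by
        simp only [pvFlatFrom]
        rw [List.drop_eq_getElem_cons hj, List.cons_append]
        rw [List.getD_eq_getElem _ _ hj]
      have htst0 : tst = (d.getD (apis.getD i "") []).getD j "" := rfl
      rw [htst0] at hp1 hp2 hp3
      rw [pvAloop_step apis d i j hh hm hi hj, hcons, List.find?_cons]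
      cases hm1 : PySem.Str.isIn "manual" ((d.getD (apis.getD i "") []).getD j "") <;>
        cases hh1 : PySem.Str.isIn "https" ((d.getD (apis.getD i "") []).getD j "") <;>
        simp_all [pvPred]
  | case12 i j hh hm h1 h2 tst hp1 hp2 hp3 hhmhh ih =>
      intro hi
      have hj : j < (d.getD (apis.getD i "") []).length := by omega
      have hcons : pvFlatFrom apis d i j =
          (d.getD (apis.getD i "") []).getD j "" :: pvFlatFrom apis d i (j + 1) := by
        simp only [pvFlatFrom]
        rw [List.drop_eq_getElem_cons hj, List.cons_append]
        rw [List.getD_eq_getElem _ _ hj]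
      have htst0 : tst = (d.getD (apis.getD i "") []).getD j "" := rfl
      rw [htst0] at hp1 hp2 hp3
      have hih := ih hi
      rw [pvAloop_step apis d i j hh hm hi hj, hcons, List.find?_cons]
      cases hm1 : PySem.Str.isIn "manual" ((d.getD (apis.getD i "") []).getD j "") <;>
        cases hh1 : PySem.Str.isIn "https" ((d.getD (apis.getD i "") []).getD j "") <;>
        (cases hm <;> cases hh <;> simp_all [pvPred])

-- find? of a disjunction whose first disjunct never holds on the list
theorem pv_find_or_left_none {α : Type} (l : List α) (p q : α → Bool)
    (h : ∀ x ∈ l, ¬ p x = true) :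
    l.find? (fun x => p x || q x) = l.find? q := by
  induction l with
  | nil => rfl
  | cons a l ih =>
      have ha : p a = false := by simpa using h a (List.mem_cons_self)
      have ih' := ih (fun x hx => h x (List.mem_cons_of_mem _ hx))
      cases hq : q a <;> simp [ha, hq, ih']

-- two pointwise-equal predicates find the same element
theorem pv_find_congr {α : Type} (l : List α) (p q : α → Bool)
    (h : ∀ x, p x = q x) : l.find? p = l.find? q := by
  rw [funext h]

-- the whole state machine = the four-category priority scan over the flat list
theorem pvMain (apis : List String) (d : PySem.Dict String (List String)) :
    pvAloop apis d 0 0 true true =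
      (match (apis.flatMap (fun api => d.getD api [])).find?
          (fun t => PySem.Str.isIn "manual" t && !(PySem.Str.isIn "https" t)) with
       | some t => some t
       | none =>
       match (apis.flatMap (fun api => d.getD api [])).find?
          (fun t => PySem.Str.isIn "manual" t && PySem.Str.isIn "https" t) with
       | some t => some t
       | none =>
       match (apis.flatMap (fun api => d.getD api [])).find?
          (fun t => !(PySem.Str.isIn "manual" t) && !(PySem.Str.isIn "https" t)) with
       | some t => some t
       | none =>
       match (apis.flatMap (fun api => d.getD api [])).find?
          (fun t => !(PySem.Str.isIn "manual" t) && PySem.Str.isIn "https" t) with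
       | some t => some t
       | none => none) := by
  match hap : apis with
  | [] =>
      rw [pvAloop]; simp
  | a :: rest =>
      have hlen : 0 < (a :: rest).length := by simp
      have hflat : pvFlatFrom (a :: rest) d 0 0 = (a :: rest).flatMap (fun api => d.getD api []) := by
        simp [pvFlatFrom]
      rw [pvAloop_eq_find _ _ 0 0 true true hlen, hflat]
      have e1 : ((a :: rest).flatMap (fun api => d.getD api [])).find? (pvPred true true) =
          ((a :: rest).flatMap (fun api => d.getD api [])).find?
            (fun t => PySem.Str.isIn "manual" t && !(PySem.Str.isIn "https" t)) := by
        apply pv_find_congr; intro x; simp [pvPred]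
      rw [e1]
      cases h1 : ((a :: rest).flatMap (fun api => d.getD api [])).find?
          (fun t => PySem.Str.isIn "manual" t && !(PySem.Str.isIn "https" t)) with
      | some t => rfl
      | none =>
          have hn1 := List.find?_eq_none.mp h1
          simp only [pvNextPhase]
          rw [pvAloop_eq_find _ _ 0 0 false true hlen, hflat]
          have e2 : ((a :: rest).flatMap (fun api => d.getD api [])).find? (pvPred false true) =
              ((a :: rest).flatMap (fun api => d.getD api [])).find?
                (fun t => (PySem.Str.isIn "manual" t && !(PySem.Str.isIn "https" t)) ||
                  (PySem.Str.isIn "manual" t && PySem.Str.isIn "https" t)) := by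
            apply pv_find_congr; intro x; simp [pvPred]
          rw [e2, pv_find_or_left_none _ _ _ hn1]
          cases h2 : ((a :: rest).flatMap (fun api => d.getD api [])).find?
              (fun t => PySem.Str.isIn "manual" t && PySem.Str.isIn "https" t) with
          | some t => rfl
          | none =>
              have hn2 := List.find?_eq_none.mp h2
              simp only [pvNextPhase, Bool.false_eq_true, if_false]
              rw [pvAloop_eq_find _ _ 0 0 true false hlen, hflat]
              have e3 : ((a :: rest).flatMap (fun api => d.getD api [])).find? (pvPred true false) =
                  ((a :: rest).flatMap (fun api => d.getD api [])).find?
                    (fun t => (PySem.Str.isIn "manual" t && !(PySem.Str.isIn "https" t)) ||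
                      (!(PySem.Str.isIn "manual" t) && !(PySem.Str.isIn "https" t))) := by
                apply pv_find_congr; intro x; simp [pvPred]
              rw [e3, pv_find_or_left_none _ _ _ hn1]
              cases h3 : ((a :: rest).flatMap (fun api => d.getD api [])).find?
                  (fun t => !(PySem.Str.isIn "manual" t) && !(PySem.Str.isIn "https" t)) with
              | some t => rfl
              | none =>
                  have hn3 := List.find?_eq_none.mp h3
                  simp only [pvNextPhase]
                  rw [pvAloop_eq_find _ _ 0 0 false false hlen, hflat]
                  have e4 : ((a :: rest).flatMap (fun api => d.getD api [])).find? (pvPred false false) =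
                      ((a :: rest).flatMap (fun api => d.getD api [])).find?
                        (fun t => (PySem.Str.isIn "manual" t && !(PySem.Str.isIn "https" t)) ||
                          ((PySem.Str.isIn "manual" t && PySem.Str.isIn "https" t) ||
                            ((!(PySem.Str.isIn "manual" t) && !(PySem.Str.isIn "https" t)) ||
                              (!(PySem.Str.isIn "manual" t) && PySem.Str.isIn "https" t)))) := by
                    apply pv_find_congr; intro x; simp [pvPred, Bool.or_assoc]
                  rw [e4, pv_find_or_left_none _ _ _ hn1, pv_find_or_left_none _ _ _ hn2,
                      pv_find_or_left_none _ _ _ hn3]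
                  cases h4 : ((a :: rest).flatMap (fun api => d.getD api [])).find?
                      (fun t => !(PySem.Str.isIn "manual" t) && PySem.Str.isIn "https" t) with
                  | some t => rfl
                  | none => simp [pvNextPhase]

-- ===== VERDICT (by name: the statement is the Claim_ definition above) =====
theorem get_next_test_from_list_py_spec : Claim_equal_get_next_test_from_list_py := by
  intro tests _
  unfold Spec_get_next_test_from_list_py get_next_test_from_list_py get_next_test_from_list_py_alt
  exact pvMain _ _
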